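-- pv_equiv track=rewrite | github.com/AvivYunker/PROJECTS | PYTHON/Programs-With-Functions/prints number with sum of odd digits = sum of even digits - between ranges.py | even_sum_even_odd
-- ===== SOURCE A (Python) =====
-- def even_sum_even_odd (num):
--     num = int(num);
--     sumE = int(0);
--     sumO = int(0);
--     while (num > 0):
--         temp = int(num % 10);
--         if (temp % 2 == 0):
--             sumE = int(sumE + temp);
--         else:
--             sumO = int(sumO + temp);
--         num = int(num / 10);
--     if (sumE == sumO):
--         return 1;
--     else:
--         return 0;
-- ===== SOURCE B (Python) =====
-- def even_sum_even_odd(num):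
--     num = int(num)
--     sumE = 0
--     sumO = 0
--     if num > 0:
--         for ch in str(num):
--             d = int(ch)
--             if d % 2 == 0:
--                 sumE = sumE + d
--             else:
--                 sumO = sumO + d
--     return 1 if sumE == sumO else 0
-- ===== Notes on version B (the rewrite author's own statement) =====
-- stated objective: idiomatic
-- what changed: B iterates over the characters of str(num) most-significant-first with a single for loop instead of A's arithmetic while-loop that peels digits least-significant-first with % and int(/10).
import Mathlib
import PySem

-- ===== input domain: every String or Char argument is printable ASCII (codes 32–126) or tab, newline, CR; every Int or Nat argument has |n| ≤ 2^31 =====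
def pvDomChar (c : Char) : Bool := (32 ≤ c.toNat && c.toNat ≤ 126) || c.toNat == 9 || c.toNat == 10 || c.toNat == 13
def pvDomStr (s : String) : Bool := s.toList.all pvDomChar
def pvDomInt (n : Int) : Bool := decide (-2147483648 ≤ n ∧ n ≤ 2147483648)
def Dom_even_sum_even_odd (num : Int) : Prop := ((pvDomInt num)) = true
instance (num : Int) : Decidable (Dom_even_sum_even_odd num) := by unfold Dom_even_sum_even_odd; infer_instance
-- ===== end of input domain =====

-- B replaces A's arithmetic digit-peeling while-loop by an idiomatic for-loop over the
-- characters of str(num), most-significant digit first; no speed claim.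

-- ===== PORT A =====
-- termination helper for A's while-loop (cited by name in decreasing_by)
theorem pv_truncdiv10_toNat_lt {num : Int} (h : 0 < num) :
    (PySem.Int.truncdiv num 10).toNat < num.toNat := by
  unfold PySem.Int.truncdiv
  rw [Int.tdiv_eq_ediv]
  simp [h.le]
  omega

-- the while-loop of A, state (num, sumE, sumO)
def evenSumLoop (num sumE sumO : Int) : Int :=
  if h : num > 0 then
    let temp := PySem.Int.mod num 10
    if PySem.Int.mod temp 2 = 0 then
      evenSumLoop (PySem.Int.truncdiv num 10) (sumE + temp) sumO
    else
      evenSumLoop (PySem.Int.truncdiv num 10) sumE (sumO + temp)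
  else
    if sumE = sumO then 1 else 0
termination_by num.toNat
decreasing_by all_goals exact pv_truncdiv10_toNat_lt h

def even_sum_even_odd (num : Int) : Int := evenSumLoop num 0 0

-- ===== PORT B =====
-- int(ch) for a one-character string
def pvDigitVal (c : Char) : Int := (PySem.Int.ofChars? [c]).getD 0

-- the for-loop of B over the characters of str(num)
def bLoop : List Char → Int → Int → Int × Int
  | [], sE, sO => (sE, sO)
  | c :: cs, sE, sO =>
    let d := pvDigitVal c
    if PySem.Int.mod d 2 = 0 then bLoop cs (sE + d) sO else bLoop cs sE (sO + d)

def even_sum_even_odd_alt (num : Int) : Int :=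
  let p := if num > 0 then bLoop (PySem.Int.toStr num).toList 0 0 else (0, 0)
  if p.1 = p.2 then 1 else 0

-- ===== PRECONDITION & SPEC =====
def Spec_even_sum_even_odd (num : Int) (out : Int) : Prop := out = even_sum_even_odd_alt num
instance (num : Int) (out : Int) : Decidable (Spec_even_sum_even_odd num out) := by unfold Spec_even_sum_even_odd; infer_instance

-- ===== CLAIM (what is proved, stated in full; the proofs are below) =====
def Claim_equal_even_sum_even_odd : Prop := ∀ (num : Int), Dom_even_sum_even_odd num → Spec_even_sum_even_odd num (even_sum_even_odd num)

-- ===== LEMMAS AND PROOFS =====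

-- ground truth: (sum of even digits, sum of odd digits) of a natural number
def sumsNat (n : Nat) : Int × Int :=
  if h : 0 < n then
    let d : Int := ((n % 10 : Nat) : Int)
    let rest := sumsNat (n / 10)
    if PySem.Int.mod d 2 = 0 then (rest.1 + d, rest.2) else (rest.1, rest.2 + d)
  else (0, 0)
termination_by n
decreasing_by exact Nat.div_lt_self h (by norm_num)

-- decimal digit characters of n, most-significant first
def digitsRev (n : Nat) : List Char :=
  if h : n < 10 then [Nat.digitChar n]
  else digitsRev (n / 10) ++ [Nat.digitChar (n % 10)]
termination_by n
decreasing_by exact Nat.div_lt_self (by omega) (by norm_num)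

theorem pv_mod10_eq {num : Int} (h : 0 < num) :
    PySem.Int.mod num 10 = ((num.toNat % 10 : Nat) : Int) := by
  unfold PySem.Int.mod
  rw [Int.fmod_eq_emod]
  simp
  omega

theorem pv_truncdiv10_toNat {num : Int} (h : 0 < num) :
    (PySem.Int.truncdiv num 10).toNat = num.toNat / 10 := by
  unfold PySem.Int.truncdiv
  rw [Int.tdiv_eq_ediv]
  simp [h.le]
  omega

-- A's loop computes the digit sums of num.toNat added onto the accumulators
theorem evenSumLoop_eq (num sumE sumO : Int) :
    evenSumLoop num sumE sumO =
      if sumE + (sumsNat num.toNat).1 = sumO + (sumsNat num.toNat).2 then 1 else 0 := by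
  generalize hn : num.toNat = n
  induction n using Nat.strong_induction_on generalizing num sumE sumO with
  | _ n ih =>
    rw [evenSumLoop]
    by_cases h : num > 0
    · have hn0 : 0 < n := by omega
      have hmod := pv_mod10_eq h
      have hdiv := pv_truncdiv10_toNat h
      rw [hn] at hmod hdiv
      have hih := ih (n / 10) (by exact Nat.div_lt_self hn0 (by norm_num))
        (PySem.Int.truncdiv num 10)
      have hs : sumsNat n =
          if PySem.Int.mod ((n % 10 : Nat) : Int) 2 = 0 then
            ((sumsNat (n / 10)).1 + ((n % 10 : Nat) : Int), (sumsNat (n / 10)).2)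
          else ((sumsNat (n / 10)).1, (sumsNat (n / 10)).2 + ((n % 10 : Nat) : Int)) := by
        rw [sumsNat]
        simp [hn0]
      simp only [h, dif_pos, hmod]
      by_cases hp : PySem.Int.mod ((n % 10 : Nat) : Int) 2 = 0
      · rw [if_pos hp, hih _ _ hdiv, hs, if_pos hp]
        have : sumE + ((n % 10 : Nat) : Int) + (sumsNat (n / 10)).1 =
            sumE + ((sumsNat (n / 10)).1 + ((n % 10 : Nat) : Int)) := by ring
        rw [this]
      · rw [if_neg hp, hih _ _ hdiv, hs, if_neg hp]
        have : sumO + ((n % 10 : Nat) : Int) + (sumsNat (n / 10)).2 =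
            sumO + ((sumsNat (n / 10)).2 + ((n % 10 : Nat) : Int)) := by ring
        have h2 : (sumE + (sumsNat (n / 10)).1 = sumO + ((n % 10 : Nat) : Int) + (sumsNat (n / 10)).2)
            ↔ (sumE + (sumsNat (n / 10)).1 = sumO + ((sumsNat (n / 10)).2 + ((n % 10 : Nat) : Int))) := by
          constructor <;> intro hx <;> omega
        simp only [h2]
    · have hn0 : n = 0 := by omega
      subst hn0
      have : sumsNat 0 = (0, 0) := by rw [sumsNat]; simp
      simp [h, this]

theorem bLoop_append (xs ys : List Char) (sE sO : Int) :
    bLoop (xs ++ ys) sE sO = bLoop ys (bLoop xs sE sO).1 (bLoop xs sE sO).2 := by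
  induction xs generalizing sE sO with
  | nil => simp [bLoop]
  | cons c cs ih =>
    simp only [List.cons_append, bLoop]
    split <;> exact ih _ _

theorem pvDigitVal_digitChar {m : Nat} (h : m < 10) :
    pvDigitVal (Nat.digitChar m) = (m : Int) := by
  interval_cases m <;> decide

-- B's loop over the digit characters of n computes the digit sums of n
theorem bLoop_digitsRev (n : Nat) (h : 0 < n) :
    bLoop (digitsRev n) 0 0 = sumsNat n := by
  induction n using Nat.strong_induction_on with
  | _ n ih =>
    rw [digitsRev, sumsNat]
    by_cases h10 : n < 10
    · have hmod : n % 10 = n := Nat.mod_eq_of_lt h10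
      have hdiv0 : n / 10 = 0 := Nat.div_eq_of_lt h10
      have hs0 : sumsNat 0 = (0, 0) := by rw [sumsNat]; simp
      simp only [dif_pos h10, dif_pos h, bLoop, pvDigitVal_digitChar h10, hmod, hdiv0, hs0]
    · have hd : 0 < n / 10 := Nat.div_pos (by omega) (by norm_num)
      have hih := ih (n / 10) (Nat.div_lt_self h (by norm_num)) hd
      rw [dif_neg h10, dif_pos h, bLoop_append, hih]
      simp only [bLoop, pvDigitVal_digitChar (Nat.mod_lt n (by norm_num))]

-- Nat.toDigitsCore, given enough fuel, produces digitsRev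
theorem toDigitsCore_eq (fuel : Nat) :
    ∀ (n : Nat) (ds : List Char), n ≤ fuel →
      Nat.toDigitsCore 10 (fuel + 1) n ds = digitsRev n ++ ds := by
  induction fuel with
  | zero =>
    intro n ds hn
    have : n = 0 := by omega
    subst this
    rw [digitsRev]
    simp [Nat.toDigitsCore]
  | succ fuel ih =>
    intro n ds hn
    rw [Nat.toDigitsCore]
    by_cases h10 : n < 10
    · have : n / 10 = 0 := Nat.div_eq_of_lt h10
      rw [digitsRev]
      simp [this, h10, Nat.mod_eq_of_lt h10]
    · have hne : ¬ n / 10 = 0 := by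
        intro hx
        have := Nat.lt_of_div_eq_zero (by norm_num) hx
        omega
      have hrec : digitsRev n = digitsRev (n / 10) ++ [(n % 10).digitChar] := by
        rw [digitsRev]; simp [h10]
      rw [if_neg hne, ih (n / 10) _ (by omega), hrec]
      simp

theorem toDigits_eq (n : Nat) : Nat.toDigits 10 n = digitsRev n := by
  have := toDigitsCore_eq n n [] (le_refl n)
  simpa [Nat.toDigits] using this

-- ===== VERDICT (by name: the statement is the Claim_ definition above) =====
theorem even_sum_even_odd_spec : Claim_equal_even_sum_even_odd := by
  intro num _
  unfold Spec_even_sum_even_odd even_sum_even_odd even_sum_even_odd_alt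
  rw [evenSumLoop_eq]
  by_cases h : num > 0
  · have hchars : (PySem.Int.toStr num).toList = digitsRev num.toNat := by
      rw [PySem.Int.toList_toStr]
      unfold PySem.Int.toChars
      rw [if_neg (by omega), toDigits_eq]
    simp only [h, if_pos, hchars,
      bLoop_digitsRev num.toNat (by omega), zero_add]
  · have hn0 : num.toNat = 0 := by omega
    have : sumsNat 0 = (0, 0) := by rw [sumsNat]; simp
    simp [h, hn0, this]
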